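-- pv_equiv track=rewrite | github.com/linux-warrior/algorithms | sprint8/main/k.py | compare_even_chars
-- ===== SOURCE A (Python) =====
-- from collections.abc import Iterable
--
-- def compare_even_chars(a: str, b: str) -> int:
--     a_chars_iter = iter(_filter_even_chars(a))
--     b_chars_iter = iter(_filter_even_chars(b))
--     a_char: str | None
--     b_char: str | None
--
--     while True:
--         try:
--             a_char = next(a_chars_iter)
--         except StopIteration:
--             a_char = None
--
--         try:
--             b_char = next(b_chars_iter)
--         except StopIteration:
--             b_char = None
--
--         if a_char is None and b_char is None:
--             return 0
--
--         elif a_char is None: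
--             return -1
--
--         elif b_char is None:
--             return 1
--
--         elif a_char < b_char:
--             return -1
--
--         elif a_char > b_char:
--             return 1
--
-- def _filter_even_chars(s: str) -> Iterable[str]:
--     return filter(lambda char: ord(char) & 1 == 0, s)
-- ===== SOURCE B (Python) =====
-- def compare_even_chars(a: str, b: str) -> int:
--     fa = [c for c in a if ord(c) % 2 == 0]
--     fb = [c for c in b if ord(c) % 2 == 0]
--     return (fa > fb) - (fa < fb)
-- ===== Notes on version B (the rewrite author's own statement) =====
-- stated objective: simpler
-- what changed: Replaces the manual lockstep next()/StopIteration/None-sentinel loop with materializing both filtered sequences and returning the sign of Python's built-in lexicographic list comparison.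
import Mathlib
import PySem

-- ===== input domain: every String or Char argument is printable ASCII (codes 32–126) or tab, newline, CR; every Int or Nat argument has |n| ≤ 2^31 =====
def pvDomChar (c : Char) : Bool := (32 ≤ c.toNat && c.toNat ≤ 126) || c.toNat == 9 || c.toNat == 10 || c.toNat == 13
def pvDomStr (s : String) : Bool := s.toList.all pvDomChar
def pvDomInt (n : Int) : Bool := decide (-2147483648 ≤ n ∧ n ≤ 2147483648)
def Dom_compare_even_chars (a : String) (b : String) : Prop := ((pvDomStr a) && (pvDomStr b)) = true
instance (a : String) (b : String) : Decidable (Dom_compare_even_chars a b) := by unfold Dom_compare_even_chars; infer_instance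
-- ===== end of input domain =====

-- B replaces A's manual lockstep sentinel loop by materializing both filtered lists and
-- taking the sign of the built-in lexicographic comparison (objective: simpler).


-- ===== PORT A =====
-- _filter_even_chars: filter(lambda char: ord(char) & 1 == 0, s)
def pvFilterEvenA (s : String) : List Char :=
  s.toList.filter (fun c => c.toNat &&& 1 == 0)

-- the while-True lockstep loop: next() yielding none at exhaustion, sentinel comparisons in order
def pvLoopA : List Char → List Char → Int
  | [], [] => 0                        -- a_char is None and b_char is None
  | [], _ :: _ => -1                   -- a_char is None
  | _ :: _, [] => 1                    -- b_char is None
  | ac :: as_, bc :: bs =>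
    if ac < bc then -1
    else if ac > bc then 1
    else pvLoopA as_ bs                -- no branch fires: loop continues

def compare_even_chars (a : String) (b : String) : Int :=
  pvLoopA (pvFilterEvenA a) (pvFilterEvenA b)

-- ===== PORT B =====
-- Python list lexicographic '<' on lists of chars
def pvLexLt : List Char → List Char → Bool
  | _, [] => false
  | [], _ :: _ => true
  | ac :: as_, bc :: bs => ac < bc || (ac == bc && pvLexLt as_ bs)

def pvFilterEvenB (s : String) : List Char :=
  s.toList.filter (fun c => c.toNat % 2 == 0)

-- (fa > fb) - (fa < fb)
def compare_even_chars_alt (a : String) (b : String) : Int :=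
  (if pvLexLt (pvFilterEvenB b) (pvFilterEvenB a) then (1 : Int) else 0)
    - (if pvLexLt (pvFilterEvenB a) (pvFilterEvenB b) then (1 : Int) else 0)

-- ===== PRECONDITION & SPEC =====
def Spec_compare_even_chars (a : String) (b : String) (out : Int) : Prop := out = compare_even_chars_alt a b
instance (a : String) (b : String) (out : Int) : Decidable (Spec_compare_even_chars a b out) := by unfold Spec_compare_even_chars; infer_instance

-- ===== CLAIM (what is proved, stated in full; the proofs are below) =====
def Claim_equal_compare_even_chars : Prop := ∀ (a : String) (b : String), Dom_compare_even_chars a b → Spec_compare_even_chars a b (compare_even_chars a b)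

-- ===== LEMMAS AND PROOFS =====

theorem pvFilter_eq (s : String) : pvFilterEvenA s = pvFilterEvenB s := by
  simp [pvFilterEvenA, pvFilterEvenB, Nat.and_one_is_mod]

theorem pvLoopA_eq_sign (xs ys : List Char) :
    pvLoopA xs ys =
      (if pvLexLt ys xs then (1 : Int) else 0) - (if pvLexLt xs ys then (1 : Int) else 0) := by
  induction xs generalizing ys with
  | nil => cases ys <;> simp [pvLoopA, pvLexLt]
  | cons x xs ih =>
    cases ys with
    | nil => simp [pvLoopA, pvLexLt]
    | cons y ys =>
      by_cases hlt : x < y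
      · have hnot : ¬ y < x := fun h => absurd (lt_trans hlt h) (lt_irrefl x)
        have hne : ¬ y == x := by
          simp only [beq_iff_eq]; exact fun h => absurd (h ▸ hlt) (lt_irrefl x)
        simp [pvLoopA, pvLexLt, hlt, hnot, hne]
      · by_cases hgt : y < x
        · have hne : ¬ x == y := by
            simp only [beq_iff_eq]; exact fun h => absurd (h ▸ hgt) (lt_irrefl x)
          simp [pvLoopA, pvLexLt, hlt, hgt, hne]
        · have heq : x = y := le_antisymm (le_of_not_gt hgt) (le_of_not_gt hlt)
          simp [pvLoopA, pvLexLt, heq, ih]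

-- ===== VERDICT (by name: the statement is the Claim_ definition above) =====
theorem compare_even_chars_spec : Claim_equal_compare_even_chars := by
  intro a b _
  unfold Spec_compare_even_chars compare_even_chars compare_even_chars_alt
  rw [pvFilter_eq, pvFilter_eq, pvLoopA_eq_sign]
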